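-- pv_equiv track=rewrite | github.com/KIM-KYOUNG-OH/Algorithm-by-python | 가비아 코테/3.py | solution
-- ===== SOURCE A (Python) =====
-- from collections import deque
--
-- def solution(N:int, coffee_times:list) -> list:
--     answer = []
--     q = deque([i for i in range(1, len(coffee_times)+1)])
--     enter_time = dict()
--     second = 0
--     making = [i for i in range(1, N+1)]
--     for i in making:
--         enter_time[i] = 0
--         q.popleft()
--     while making:
--         second += 1
--         temp = []
--         for i in range(len(making)):
--             if second-enter_time[making[i]] == coffee_times[making[i]-1]:
--                 answer.append(making[i])
--                 temp.append(making[i])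
--         for i in temp:
--             making.remove(i)
--         for _ in range(N-len(making)):
--             if len(making)<N and q:
--                 num = q.popleft()
--                 making.append(num)
--                 enter_time[num] = second
--
--     return answer
-- ===== SOURCE B (Python) =====
-- def solution(N: int, coffee_times: list) -> list:
--     # Event-driven: jump from one finish time to the next instead of ticking
--     # second by second; machines kept as (id, finish_time) pairs.
--     M = len(coffee_times)
--
--     def fill(running, next_id, base):
--         while len(running) < N and next_id <= M:
--             running.append((next_id, base + coffee_times[next_id - 1]))
--             next_id += 1
--         return running, next_id
--
--     answer = []
--     running, next_id = fill([], 1, 0)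
--     while running:
--         t = min(f for _, f in running)
--         for i, f in running:
--             if f == t:
--                 answer.append(i)
--         running, next_id = fill([(i, f) for i, f in running if f != t], next_id, t)
--     return answer
-- ===== Notes on version B (the rewrite author's own statement) =====
-- stated objective: faster
-- what changed: B replaces A's second-by-second simulation (rescan all running machines every simulated second) with an event-driven simulation keeping (id, finish_time) pairs that jumps directly from one finish time to the next, so work is per event instead of per simulated second; intended as faster (per-event vs per-second cost) — a timing run could not measure a ratio because A already timed out at n=16 where B returned.
-- outside the precondition, e.g. on solution(3, [5, 1]): A raises IndexError, B returns [2, 1]; on solution(1, [0]): A does not finish within the time limit, B returns [1]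
import Mathlib
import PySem

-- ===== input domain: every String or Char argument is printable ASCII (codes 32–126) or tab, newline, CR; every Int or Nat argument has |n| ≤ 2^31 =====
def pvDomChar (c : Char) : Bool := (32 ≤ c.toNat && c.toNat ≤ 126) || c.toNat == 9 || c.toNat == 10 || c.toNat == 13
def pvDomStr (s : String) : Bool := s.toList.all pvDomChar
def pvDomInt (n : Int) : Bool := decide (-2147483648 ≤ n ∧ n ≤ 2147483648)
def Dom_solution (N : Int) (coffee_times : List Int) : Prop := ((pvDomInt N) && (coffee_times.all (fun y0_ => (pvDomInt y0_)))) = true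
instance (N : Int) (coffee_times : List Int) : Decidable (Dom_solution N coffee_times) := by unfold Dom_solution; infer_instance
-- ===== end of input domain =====

-- B replaces A's second-by-second scan by an event-driven jump to the next finish time
-- (machines kept as (id, finish) pairs); same return value on all inputs admitted by Pre_.

-- ===== PORT A =====

/-- `for i in temp: making.remove(i)` (here every removed id is present, so `remove` never raises;
    `getD` supplies the unreachable none branch). -/
def solutionRemoveAll (making temp : List Int) : List Int :=
  temp.foldl (fun m i => (PySem.List.remove? m i).getD m) making

/-- `for _ in range(count): if len(making) < N and q: num = q.popleft(); making.append(num); enter_time[num] = second` -/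
def solutionRefill (N second : Int) : Nat → List Int → List Int → PySem.Dict Int Int →
    List Int × List Int × PySem.Dict Int Int
  | 0, making, q, enter => (making, q, enter)
  | c+1, making, q, enter =>
    if (making.length : Int) < N then
      match q with
      | [] => solutionRefill N second c making [] enter
      | num :: q' => solutionRefill N second c (making ++ [num]) q' (enter.insert num second)
    else solutionRefill N second c making q enter

/-- A's `while making:` loop.  Fuel guard: A loops forever when some admitted coffee time is ≤ 0;
    those inputs are excluded by `Pre_solution`, under which the fuel below is proved sufficient.
    `coffee_times[i-1]` / `enter_time[i]` are in range / present on every reachable id;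
    `pyGetD`/`getD` supply the unreachable raising branches. -/
def solutionLoop (cts : List Int) (N : Int) :
    Nat → List Int → List Int → PySem.Dict Int Int → Int → List Int → List Int
  | 0, ans, _, _, _, _ => ans
  | fuel+1, ans, making, enter, second, q =>
    if making.isEmpty then ans
    else
      let second' := second + 1
      let temp := making.filter fun i =>
        decide (second' - enter.getD i 0 = PySem.List.pyGetD cts (i-1) 0)
      let making' := solutionRemoveAll making temp
      let r := solutionRefill N second' (N - (making'.length : Int)).toNat making' q enter
      solutionLoop cts N fuel (ans ++ temp) r.1 r.2.2 second' r.2.1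

def solution (N : Int) (coffee_times : List Int) : List Int :=
  let q0 := PySem.List.pyRange 1 ((coffee_times.length : Int) + 1) 1
  let making := PySem.List.pyRange 1 (N + 1) 1
  -- `for i in making: enter_time[i] = 0; q.popleft()`  (popleft on an empty deque raises; excluded by Pre_)
  let init := making.foldl (fun (p : PySem.Dict Int Int × List Int) i =>
    (p.1.insert i 0, p.2.drop 1)) (PySem.Dict.empty, q0)
  solutionLoop coffee_times N ((coffee_times.map Int.toNat).sum + 1) [] making init.1 0 init.2

-- ===== PORT B =====

/-- `while len(running) < N and next_id <= M: running.append((next_id, base + coffee_times[next_id-1])); next_id += 1` -/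
def solutionAltFill (cts : List Int) (N base : Int) (running : List (Int × Int)) (nextId : Int) :
    List (Int × Int) × Int :=
  if h : (running.length : Int) < N ∧ nextId ≤ (cts.length : Int) then
    solutionAltFill cts N base
      (running ++ [(nextId, base + PySem.List.pyGetD cts (nextId - 1) 0)]) (nextId + 1)
  else (running, nextId)
termination_by ((cts.length : Int) + 1 - nextId).toNat
decreasing_by omega

/-- B's `while running:` loop.  Fuel guard only: each iteration retires at least one machine and
    at most `len(coffee_times)` machines ever run, so `len(coffee_times) + 1` iterations suffice. -/
def solutionAltLoop (cts : List Int) (N : Int) :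
    Nat → List Int → List (Int × Int) → Int → List Int
  | 0, ans, _, _ => ans
  | fuel+1, ans, running, nextId =>
    if running.isEmpty then ans
    else
      let t := (PySem.List.min? (running.map Prod.snd) (fun x => x)).getD 0
      let done := (running.filter (fun p => decide (p.2 = t))).map Prod.fst
      let r := solutionAltFill cts N t (running.filter (fun p => decide (p.2 ≠ t))) nextId
      solutionAltLoop cts N fuel (ans ++ done) r.1 r.2

def solution_alt (N : Int) (coffee_times : List Int) : List Int :=
  let r := solutionAltFill coffee_times N 0 [] 1
  solutionAltLoop coffee_times N (coffee_times.length + 1) [] r.1 r.2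

-- ===== PRECONDITION & SPEC =====

-- Pre_ excludes the inputs on which A does not return: with at least one machine (N ≥ 1),
-- A raises IndexError when N exceeds the number of orders (popleft on an exhausted deque),
-- and loops forever when some coffee time is ≤ 0 (its finish condition can never fire).
def Pre_solution (N : Int) (coffee_times : List Int) : Prop :=
  N ≤ 0 ∨ (N ≤ (coffee_times.length : Int) ∧ ∀ t ∈ coffee_times, 1 ≤ t)

instance (N : Int) (coffee_times : List Int) : Decidable (Pre_solution N coffee_times) := by
  unfold Pre_solution; infer_instance

def pvWitness_solution : Int × List Int := (2, [1, 2, 3])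

def Spec_solution (N : Int) (coffee_times : List Int) (out : List Int) : Prop :=
  out = solution_alt N coffee_times
instance (N : Int) (coffee_times : List Int) (out : List Int) : Decidable (Spec_solution N coffee_times out) := by
  unfold Spec_solution; infer_instance

-- ===== CLAIM (what is proved, stated in full; the proofs are below) =====
def Claim_equal_solution : Prop := ∀ (N : Int) (coffee_times : List Int), Dom_solution N coffee_times → Pre_solution N coffee_times → Spec_solution N coffee_times (solution N coffee_times)

-- ===== LEMMAS AND PROOFS =====

/-- `coffee_times[j-1]`, the brewing time of order `j`. -/
def tOf (cts : List Int) (j : Int) : Int := PySem.List.pyGetD cts (j-1) 0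

/-- finish time of machine `i` as A records it: entry second + brewing time. -/
def finE (cts : List Int) (enter : PySem.Dict Int Int) (i : Int) : Int :=
  enter.getD i 0 + tOf cts i

/-- brewing time still owed by the orders not yet started. -/
def tailSum (cts : List Int) (a : Int) : Int :=
  ((PySem.List.pyRange a ((cts.length : Int) + 1) 1).map (tOf cts)).sum

/-- total seconds A still has to tick through: a fuel bound for its loop. -/
def boundA (cts : List Int) (enter : PySem.Dict Int Int) (second : Int)
    (making : List Int) (nextId : Int) : Int :=
  (making.map (fun i => finE cts enter i - second)).sum + tailSum cts nextId

/-- inserting value `s` at every key of `pyRange a b 1` (shape of A's enter_time updates). -/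
def insertRange (e : PySem.Dict Int Int) (a b s : Int) : PySem.Dict Int Int :=
  (PySem.List.pyRange a b 1).foldl (fun e j => e.insert j s) e

/-- joint invariant of A's loop state (`making`, `enter`, `second`) and B's `nextId`. -/
def InvAB (cts : List Int) (N : Int) (making : List Int) (enter : PySem.Dict Int Int)
    (second nextId : Int) : Prop :=
  making.Pairwise (· < ·) ∧
  (∀ i ∈ making, 1 ≤ i ∧ i < nextId) ∧
  1 ≤ nextId ∧ nextId ≤ (cts.length : Int) + 1 ∧
  (∀ i ∈ making, second < finE cts enter i) ∧
  (making.length : Int) ≤ N ∧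
  ((making.length : Int) = N ∨ nextId = (cts.length : Int) + 1)

lemma refill_nil (N s : Int) : ∀ (c : Nat) (making : List Int) (enter : PySem.Dict Int Int),
    solutionRefill N s c making [] enter = (making, [], enter) := by
  intro c
  induction c with
  | zero => intro making enter; rfl
  | succ c ih =>
    intro making enter
    simp only [solutionRefill]
    split <;> exact ih making enter

lemma refill_noop (N s : Int) : ∀ (c : Nat) (making q : List Int) (enter : PySem.Dict Int Int),
    ¬ ((making.length : Int) < N) →
    solutionRefill N s c making q enter = (making, q, enter) := by
  intro c
  induction c with
  | zero => intro making q enter _; rfl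
  | succ c ih =>
    intro making q enter h
    simp only [solutionRefill, if_neg h]
    exact ih making q enter h

lemma removeAll_cons_notmem (a : Int) : ∀ (ts m : List Int), (∀ i ∈ ts, i ≠ a) →
    solutionRemoveAll (a :: m) ts = a :: solutionRemoveAll m ts := by
  intro ts
  induction ts with
  | nil => intro m _; rfl
  | cons i ts ih =>
    intro m h
    have hia : i ≠ a := h i (by simp)
    show solutionRemoveAll ((PySem.List.remove? (a :: m) i).getD (a :: m)) ts
        = a :: solutionRemoveAll ((PySem.List.remove? m i).getD m) ts
    rw [PySem.List.remove?_cons_of_ne m (Ne.symm hia)]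
    cases hr : PySem.List.remove? m i with
    | none => simp only [Option.map_none, Option.getD_none]
              exact ih m (fun j hj => h j (by simp [hj]))
    | some m' => simp only [Option.map_some, Option.getD_some]
                 exact ih m' (fun j hj => h j (by simp [hj]))

lemma removeAll_filter (p : Int → Bool) : ∀ (l : List Int), l.Nodup →
    solutionRemoveAll l (l.filter p) = l.filter (fun i => !(p i)) := by
  intro l
  induction l with
  | nil => intro _; rfl
  | cons a rest ih =>
    intro hnd
    have hna : a ∉ rest := (List.nodup_cons.mp hnd).1
    have hnd' : rest.Nodup := (List.nodup_cons.mp hnd).2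
    by_cases hp : p a
    · rw [List.filter_cons_of_pos hp]
      show solutionRemoveAll ((PySem.List.remove? (a :: rest) a).getD (a :: rest)) (rest.filter p)
          = (a :: rest).filter (fun i => !(p i))
      rw [PySem.List.remove?_cons_self]
      simp only [Option.getD_some]
      rw [List.filter_cons_of_neg (by simp [hp]), ih hnd']
    · rw [List.filter_cons_of_neg (by simp [hp])]
      rw [removeAll_cons_notmem a (rest.filter p) rest
        (fun i hi => fun he => hna (he ▸ (List.mem_of_mem_filter hi)))]
      rw [List.filter_cons_of_pos (by simp [hp]), ih hnd']

lemma getD_insertRange (s : Int) : ∀ (n : Nat) (a b : Int), (b - a).toNat = n →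
    ∀ (e : PySem.Dict Int Int) (i : Int),
    (insertRange e a b s).getD i 0 = if a ≤ i ∧ i < b then s else e.getD i 0 := by
  intro n
  induction n with
  | zero =>
    intro a b hn e i
    have hba : b ≤ a := by omega
    unfold insertRange
    rw [PySem.List.pyRange_one_eq_nil hba]
    simp only [List.foldl_nil]
    rw [if_neg (by omega)]
  | succ n ih =>
    intro a b hn e i
    have hab : a < b := by omega
    unfold insertRange
    rw [PySem.List.pyRange_one_cons hab]
    simp only [List.foldl_cons]
    have := ih (a+1) b (by omega) (e.insert a s) i
    unfold insertRange at this
    rw [this, PySem.Dict.getD_insert]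
    split_ifs <;> omega

lemma sum_toNat_of_nonneg : ∀ (l : List Int), (∀ t ∈ l, 0 ≤ t) →
    ((l.map Int.toNat).sum : Int) = l.sum := by
  intro l
  induction l with
  | nil => intro _; rfl
  | cons a l ih =>
    intro h
    simp only [List.map_cons, List.sum_cons, Nat.cast_add]
    rw [ih (fun t ht => h t (by simp [ht]))]
    have := h a (by simp)
    omega

lemma sum_map_filter_not_of_zero (f : Int → Int) (p : Int → Bool) : ∀ (l : List Int),
    (∀ i ∈ l, p i = true → f i = 0) →
    ((l.filter (fun i => !(p i))).map f).sum = (l.map f).sum := by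
  intro l
  induction l with
  | nil => intro _; rfl
  | cons a l ih =>
    intro h
    by_cases hp : p a
    · rw [List.filter_cons_of_neg (by simp [hp])]
      simp only [List.map_cons, List.sum_cons, h a (by simp) hp, zero_add]
      exact ih (fun i hi => h i (by simp [hi]))
    · rw [List.filter_cons_of_pos (by simp [hp])]
      simp only [List.map_cons, List.sum_cons]
      rw [ih (fun i hi => h i (by simp [hi]))]


lemma tOf_ge_one (cts : List Int) (ht : ∀ t ∈ cts, 1 ≤ t) (j : Int)
    (h1 : 1 ≤ j) (h2 : j ≤ (cts.length : Int)) : 1 ≤ tOf cts j := by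
  unfold tOf
  rw [PySem.List.pyGetD_eq_getElem cts 0 (by omega) (by omega)]
  exact ht _ (List.getElem_mem _)

lemma tailSum_nonneg (cts : List Int) (ht : ∀ t ∈ cts, 1 ≤ t) (a : Int) (ha : 1 ≤ a) :
    0 ≤ tailSum cts a := by
  apply List.sum_nonneg
  intro x hx
  obtain ⟨j, hj, rfl⟩ := List.mem_map.mp hx
  obtain ⟨hj1, hj2⟩ := PySem.List.mem_pyRange_one.mp hj
  have := tOf_ge_one cts ht j (by omega) (by omega)
  omega

lemma map_getD_range (l : List Int) : (List.range l.length).map (fun k => l.getD k 0) = l := by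
  apply List.ext_getElem (by simp)
  intro i h1 h2
  simp [List.getD_eq_getElem?_getD, List.getElem?_eq_getElem h2]

lemma tailSum_one (cts : List Int) : tailSum cts 1 = cts.sum := by
  unfold tailSum
  rw [PySem.List.pyRange_one 1 ((cts.length : Int) + 1)]
  rw [List.map_map]
  have : (cts.length : Int) + 1 - 1 = (cts.length : Int) := by omega
  rw [this, Int.toNat_natCast]
  rw [List.map_congr_left (fun k hk => ?_), map_getD_range]
  simp only [Function.comp_apply]
  unfold tOf
  rw [show (1 : Int) + (k : Int) - 1 = (k : Int) by omega]
  exact PySem.List.pyGetD_natCast cts k 0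

lemma insertRange_nil (e : PySem.Dict Int Int) (a b s : Int) (hba : b ≤ a) :
    insertRange e a b s = e := by
  unfold insertRange
  rw [PySem.List.pyRange_one_eq_nil hba, List.foldl_nil]

lemma insertRange_cons (e : PySem.Dict Int Int) (a b s : Int) (hab : a < b) :
    insertRange e a b s = insertRange (e.insert a s) (a+1) b s := by
  unfold insertRange
  rw [PySem.List.pyRange_one_cons hab, List.foldl_cons]

lemma refill_corr (cts : List Int) (N s : Int) :
    ∀ (c : Nat) (making : List Int) (enter : PySem.Dict Int Int) (nextId : Int),
    N ≤ (making.length : Int) + c →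
    (making.length : Int) ≤ N →
    nextId ≤ (cts.length : Int) + 1 →
    ∃ n' : Int, nextId ≤ n' ∧ n' ≤ (cts.length : Int) + 1 ∧
      ((making.length : Int) + (n' - nextId) ≤ N) ∧
      ((making.length : Int) + (n' - nextId) = N ∨ n' = (cts.length : Int) + 1) ∧
      solutionRefill N s c making (PySem.List.pyRange nextId ((cts.length : Int) + 1) 1) enter
        = (making ++ PySem.List.pyRange nextId n' 1, PySem.List.pyRange n' ((cts.length : Int) + 1) 1,
           insertRange enter nextId n' s) ∧
      ∀ running : List (Int × Int), running.length = making.length →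
        solutionAltFill cts N s running nextId
          = (running ++ (PySem.List.pyRange nextId n' 1).map (fun j => (j, s + tOf cts j)), n') := by
  intro c
  induction c with
  | zero =>
    intro making enter nextId h1 h2 h3
    refine ⟨nextId, le_refl _, h3, by omega, by omega, ?_, ?_⟩
    · rw [PySem.List.pyRange_one_eq_nil (le_refl nextId), insertRange_nil enter nextId nextId s (le_refl nextId)]
      simp only [List.append_nil]
      rfl
    · intro running hlen
      rw [solutionAltFill, dif_neg (by rw [hlen]; omega)]
      rw [PySem.List.pyRange_one_eq_nil (le_refl nextId)]
      simp
  | succ c ih =>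
    intro making enter nextId h1 h2 h3
    by_cases hfull : (making.length : Int) < N
    · by_cases hq : nextId ≤ (cts.length : Int)
      · rw [PySem.List.pyRange_one_cons (show nextId < (cts.length : Int) + 1 by omega)]
        obtain ⟨n', ha1, ha2, ha3, ha4, hA, hB⟩ :=
          ih (making ++ [nextId]) (enter.insert nextId s) (nextId + 1)
            (by simp only [List.length_append, List.length_cons, List.length_nil]; push_cast; omega)
            (by simp only [List.length_append, List.length_cons, List.length_nil]; push_cast; omega)
            (by omega)
        refine ⟨n', by omega, ha2, ?_, ?_, ?_, ?_⟩
        · simp only [List.length_append, List.length_cons, List.length_nil] at ha3; push_cast at ha3 ⊢; omega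
        · simp only [List.length_append, List.length_cons, List.length_nil] at ha4; push_cast at ha4 ⊢; omega
        · simp only [solutionRefill, if_pos hfull]
          rw [hA, List.append_assoc, List.singleton_append, ← PySem.List.pyRange_one_cons (show nextId < n' by omega),
            insertRange_cons enter nextId n' s (show nextId < n' by omega)]
        · intro running hlen
          rw [solutionAltFill, dif_pos ⟨by rw [hlen]; exact_mod_cast hfull, hq⟩]
          rw [hB (running ++ [(nextId, s + PySem.List.pyGetD cts (nextId - 1) 0)])
            (by simp [hlen])]
          rw [PySem.List.pyRange_one_cons (show nextId < n' by omega)]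
          simp [List.append_assoc, tOf]
      · have hnil : PySem.List.pyRange nextId ((cts.length : Int) + 1) 1 = [] :=
          PySem.List.pyRange_one_eq_nil (by omega)
        refine ⟨nextId, le_refl _, h3, by omega, by omega, ?_, ?_⟩
        · rw [hnil, refill_nil, PySem.List.pyRange_one_eq_nil (le_refl nextId),
            insertRange_nil enter nextId nextId s (le_refl nextId)]
          simp
        · intro running hlen
          rw [solutionAltFill, dif_neg (by intro hc; exact hq hc.2)]
          rw [PySem.List.pyRange_one_eq_nil (le_refl nextId)]
          simp
    · refine ⟨nextId, le_refl _, h3, by omega, by omega, ?_, ?_⟩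
      · rw [refill_noop N s _ _ _ _ hfull, PySem.List.pyRange_one_eq_nil (le_refl nextId),
          insertRange_nil enter nextId nextId s (le_refl nextId)]
        simp
      · intro running hlen
        rw [solutionAltFill, dif_neg (by rw [hlen]; intro hc; exact hfull hc.1)]
        rw [PySem.List.pyRange_one_eq_nil (le_refl nextId)]
        simp


lemma loopA_step (cts : List Int) (N : Int) (f : Nat) (ans making : List Int)
    (enter : PySem.Dict Int Int) (second : Int) (q : List Int) (hne : making ≠ []) :
    solutionLoop cts N (f+1) ans making enter second q =
      solutionLoop cts N f
        (ans ++ making.filter (fun i => decide (second + 1 - enter.getD i 0 = PySem.List.pyGetD cts (i-1) 0)))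
        (solutionRefill N (second+1)
          (N - ((solutionRemoveAll making (making.filter (fun i => decide (second + 1 - enter.getD i 0 = PySem.List.pyGetD cts (i-1) 0)))).length : Int)).toNat
          (solutionRemoveAll making (making.filter (fun i => decide (second + 1 - enter.getD i 0 = PySem.List.pyGetD cts (i-1) 0)))) q enter).1
        (solutionRefill N (second+1)
          (N - ((solutionRemoveAll making (making.filter (fun i => decide (second + 1 - enter.getD i 0 = PySem.List.pyGetD cts (i-1) 0)))).length : Int)).toNat
          (solutionRemoveAll making (making.filter (fun i => decide (second + 1 - enter.getD i 0 = PySem.List.pyGetD cts (i-1) 0)))) q enter).2.2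
        (second+1)
        (solutionRefill N (second+1)
          (N - ((solutionRemoveAll making (making.filter (fun i => decide (second + 1 - enter.getD i 0 = PySem.List.pyGetD cts (i-1) 0)))).length : Int)).toNat
          (solutionRemoveAll making (making.filter (fun i => decide (second + 1 - enter.getD i 0 = PySem.List.pyGetD cts (i-1) 0)))) q enter).2.1 := by
  simp only [solutionLoop]
  rw [if_neg (by simp [hne])]

lemma loopB_step (cts : List Int) (N : Int) (f : Nat) (ans : List Int)
    (running : List (Int × Int)) (nextId m : Int) (hne : running ≠ [])
    (hmin : PySem.List.min? (running.map Prod.snd) (fun x => x) = some m) :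
    solutionAltLoop cts N (f+1) ans running nextId =
      solutionAltLoop cts N f
        (ans ++ (running.filter (fun p => decide (p.2 = m))).map Prod.fst)
        (solutionAltFill cts N m (running.filter (fun p => decide (p.2 ≠ m))) nextId).1
        (solutionAltFill cts N m (running.filter (fun p => decide (p.2 ≠ m))) nextId).2 := by
  simp only [solutionAltLoop]
  rw [if_neg (by simp [hne]), hmin]
  simp only [Option.getD_some]
  rfl

lemma loopA_silent_one (cts : List Int) (N : Int) (f : Nat) (ans making : List Int)
    (enter : PySem.Dict Int Int) (second : Int) (q : List Int)
    (hne : making ≠ [])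
    (hfin : ∀ i ∈ making, second + 1 < finE cts enter i)
    (hq : (making.length : Int) = N ∨ q = []) :
    solutionLoop cts N (f+1) ans making enter second q
      = solutionLoop cts N f ans making enter (second+1) q := by
  rw [loopA_step cts N f ans making enter second q hne]
  have htemp : making.filter (fun i => decide (second + 1 - enter.getD i 0 = PySem.List.pyGetD cts (i-1) 0)) = [] := by
    rw [List.filter_eq_nil_iff]
    intro i hi
    simp only [decide_eq_true_eq]
    have := hfin i hi
    unfold finE tOf at this
    omega
  rw [htemp]
  have hrm : solutionRemoveAll making [] = making := rfl
  rw [hrm, List.append_nil]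
  rcases hq with hq | hq
  · rw [show (N - (making.length : Int)).toNat = 0 by omega]
    rfl
  · subst hq
    rw [refill_nil]

lemma loopA_silent_steps (cts : List Int) (N : Int) :
    ∀ (g f : Nat) (ans making : List Int) (enter : PySem.Dict Int Int) (second : Int) (q : List Int),
    making ≠ [] →
    (∀ i ∈ making, second + (g : Int) < finE cts enter i) →
    ((making.length : Int) = N ∨ q = []) →
    solutionLoop cts N (f + g) ans making enter second q
      = solutionLoop cts N f ans making enter (second + (g : Int)) q := by
  intro g
  induction g with
  | zero => intro f ans making enter second q _ _ _; simp
  | succ g ih =>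
    intro f ans making enter second q hne hfin hq
    have h1 : solutionLoop cts N (f + (g+1)) ans making enter second q
        = solutionLoop cts N (f + g) ans making enter (second + 1) q := by
      rw [show f + (g+1) = (f+g) + 1 by omega]
      exact loopA_silent_one cts N (f+g) ans making enter second q hne
        (fun i hi => by have := hfin i hi; push_cast at this ⊢; omega) hq
    rw [h1, ih f ans making enter (second+1) q hne
      (fun i hi => by have := hfin i hi; push_cast at this ⊢; omega) hq]
    congr 1
    push_cast
    ring

lemma init_fold : ∀ (l : List Int) (d : PySem.Dict Int Int) (q : List Int),
    l.foldl (fun p i => (p.1.insert i 0, p.2.drop 1)) (d, q)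
      = (l.foldl (fun d i => d.insert i 0) d, q.drop l.length) := by
  intro l
  induction l with
  | nil => intro d q; simp
  | cons a l ih =>
    intro d q
    simp only [List.foldl_cons, List.length_cons]
    rw [ih (d.insert a 0) (q.drop 1), List.drop_drop, Nat.add_comm]

lemma boundA_init (cts : List Int) (N : Int) (hN : 1 ≤ N) (hNM : N ≤ (cts.length : Int)) :
    boundA cts (insertRange PySem.Dict.empty 1 (N+1) 0) 0 (PySem.List.pyRange 1 (N+1) 1) (N+1)
      = cts.sum := by
  unfold boundA
  have hmap : (PySem.List.pyRange 1 (N+1) 1).map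
        (fun i => finE cts (insertRange PySem.Dict.empty 1 (N+1) 0) i - 0)
      = (PySem.List.pyRange 1 (N+1) 1).map (tOf cts) := by
    apply List.map_congr_left
    intro i hi
    obtain ⟨h1, h2⟩ := PySem.List.mem_pyRange_one.mp hi
    unfold finE
    rw [getD_insertRange 0 ((N + 1 - 1).toNat) 1 (N+1) rfl, if_pos ⟨h1, h2⟩]
    omega
  rw [hmap, ← tailSum_one cts]
  unfold tailSum
  rw [PySem.List.pyRange_one_append 1 (N+1) ((cts.length : Int) + 1) (by omega) (by omega),
    List.map_append, List.sum_append]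

lemma loop_corr (cts : List Int) (N : Int) (ht : ∀ t ∈ cts, 1 ≤ t) :
    ∀ (fA : Nat) (ans making : List Int) (enter : PySem.Dict Int Int) (second nextId : Int) (fB : Nat),
    InvAB cts N making enter second nextId →
    boundA cts enter second making nextId < (fA : Int) →
    making.length + (((cts.length : Int) + 1 - nextId).toNat) < fB →
    solutionLoop cts N fA ans making enter second (PySem.List.pyRange nextId ((cts.length : Int) + 1) 1)
      = solutionAltLoop cts N fB ans (making.map (fun i => (i, finE cts enter i))) nextId := by
  intro fA
  induction fA using Nat.strong_induction_on with
  | _ fA IH =>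
  intro ans making enter second nextId fB hInv hbA hbB
  obtain ⟨hpw, hids, hn1, hnM, hfin, hlenle, hfull⟩ := hInv
  obtain ⟨fB', rfl⟩ : ∃ fB', fB = fB' + 1 := ⟨fB - 1, by omega⟩
  by_cases hmk : making = []
  · subst hmk
    have h0 : 0 ≤ boundA cts enter second [] nextId := by
      unfold boundA
      simp only [List.map_nil, List.sum_nil, zero_add]
      exact tailSum_nonneg cts ht nextId hn1
    obtain ⟨fA', rfl⟩ : ∃ fA', fA = fA' + 1 := ⟨fA - 1, by omega⟩
    simp [solutionLoop, solutionAltLoop]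
  · have hrne : making.map (fun i => (i, finE cts enter i)) ≠ [] := by simp [hmk]
    rcases hmin : PySem.List.min? ((making.map (fun i => (i, finE cts enter i))).map Prod.snd)
        (fun x => x) with _ | m
    · rw [PySem.List.min?_eq_none_iff] at hmin
      simp [hmk] at hmin
    obtain ⟨i0, hi0mem, hi0⟩ : ∃ i0 ∈ making, finE cts enter i0 = m := by
      have := PySem.List.min?_mem hmin
      simp only [List.map_map, List.mem_map, Function.comp] at this
      obtain ⟨i0, h1, h2⟩ := this
      exact ⟨i0, h1, h2⟩
    have hmmin : ∀ i ∈ making, m ≤ finE cts enter i := by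
      intro i hi
      refine PySem.List.min?_isMin hmin (finE cts enter i) ?_
      simp only [List.map_map]
      exact List.mem_map_of_mem hi
    have hm_gt : second < m := hi0 ▸ hfin i0 hi0mem
    set g : Nat := (m - 1 - second).toNat with hg
    have hgI : (g : Int) = m - 1 - second := by omega
    have hsum_ge : m - second ≤ (making.map (fun i => finE cts enter i - second)).sum := by
      have hnn : ∀ x ∈ making.map (fun i => finE cts enter i - second), 0 ≤ x := by
        intro x hx
        obtain ⟨i, hi, rfl⟩ := List.mem_map.mp hx
        have := hfin i hi
        omega
      have h1 := List.single_le_sum hnn (finE cts enter i0 - second)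
        (List.mem_map_of_mem hi0mem)
      omega
    have htail_nn : 0 ≤ tailSum cts nextId := tailSum_nonneg cts ht nextId hn1
    have hfa2 : g + 1 < fA := by
      unfold boundA at hbA
      omega
    obtain ⟨f', hf'⟩ : ∃ f', fA = (f' + 1) + g := ⟨fA - 1 - g, by omega⟩
    rw [hf']
    rw [loopA_silent_steps cts N g (f' + 1) ans making enter second _ hmk
      (fun i hi => by have := hmmin i hi; omega)
      (by rcases hfull with h | h
          · exact Or.inl h
          · exact Or.inr (PySem.List.pyRange_one_eq_nil (by omega)))]
    rw [show second + (g : Int) = m - 1 by omega]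
    rw [loopA_step cts N f' ans making enter (m - 1) _ hmk]
    rw [show m - 1 + 1 = m by ring]
    have hfilter : making.filter (fun i => decide (m - enter.getD i 0 = PySem.List.pyGetD cts (i-1) 0))
        = making.filter (fun i => decide (finE cts enter i = m)) :=
      List.filter_congr (fun i hi => by
        simp only [decide_eq_decide]
        unfold finE tOf
        omega)
    rw [hfilter]
    have hrm : solutionRemoveAll making (making.filter (fun i => decide (finE cts enter i = m)))
        = making.filter (fun i => !(decide (finE cts enter i = m))) :=
      removeAll_filter _ making (hpw.nodup)
    rw [hrm]
    set kept := making.filter (fun i => !(decide (finE cts enter i = m))) with hkept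
    have hkle : (kept.length : Int) ≤ (making.length : Int) := by
      exact_mod_cast List.length_filter_le _ making
    obtain ⟨n', ha1, ha2, ha3, ha4, hA, hB⟩ := refill_corr cts N m
      ((N - (kept.length : Int)).toNat) kept enter nextId (by omega) (by omega) hnM
    rw [hA]
    -- B side
    rw [loopB_step cts N fB' ans (making.map (fun i => (i, finE cts enter i))) nextId m hrne hmin]
    have hdone : ((making.map (fun i => (i, finE cts enter i))).filter
          (fun p => decide (p.2 = m))).map Prod.fst
        = making.filter (fun i => decide (finE cts enter i = m)) := by
      rw [List.filter_map, List.map_map]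
      rw [show ((fun (p : Int × Int) => decide (p.2 = m)) ∘ (fun i => (i, finE cts enter i)))
          = (fun i => decide (finE cts enter i = m)) from rfl]
      rw [show (Prod.fst ∘ (fun (i : Int) => (i, finE cts enter i))) = id from rfl, List.map_id]
    rw [hdone]
    have hrunning' : (making.map (fun i => (i, finE cts enter i))).filter
          (fun p => decide (p.2 ≠ m)) = kept.map (fun i => (i, finE cts enter i)) := by
      rw [List.filter_map]
      congr 1
      apply List.filter_congr
      intro i hi
      simp [Function.comp, decide_not]
    rw [hrunning']
    rw [hB (kept.map (fun i => (i, finE cts enter i))) (by simp)]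
    -- facts about kept
    have hkeptsub : ∀ i ∈ kept, i ∈ making := fun i hi => List.mem_of_mem_filter hi
    have hkept_ne : ∀ i ∈ kept, finE cts enter i ≠ m := by
      intro i hi
      have := List.of_mem_filter hi
      simpa using this
    have hrangeids : ∀ j ∈ PySem.List.pyRange nextId n' 1, nextId ≤ j ∧ j < n' := by
      intro j hj
      exact PySem.List.mem_pyRange_one.mp hj
    have hlenrange : ((PySem.List.pyRange nextId n' 1).length : Int) = n' - nextId := by
      rw [PySem.List.length_pyRange_one]
      omega
    -- the new enter lookups
    have hEkept : ∀ i ∈ kept, finE cts (insertRange enter nextId n' m) i = finE cts enter i := by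
      intro i hi
      unfold finE
      rw [getD_insertRange m ((n' - nextId).toNat) nextId n' rfl,
        if_neg (by have := (hids i (hkeptsub i hi)).2; omega)]
    have hErange : ∀ j ∈ PySem.List.pyRange nextId n' 1,
        finE cts (insertRange enter nextId n' m) j = m + tOf cts j := by
      intro j hj
      obtain ⟨hj1, hj2⟩ := hrangeids j hj
      unfold finE
      rw [getD_insertRange m ((n' - nextId).toNat) nextId n' rfl, if_pos ⟨hj1, hj2⟩]
    have hmapeq : (kept ++ PySem.List.pyRange nextId n' 1).map
          (fun i => (i, finE cts (insertRange enter nextId n' m) i))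
        = kept.map (fun i => (i, finE cts enter i))
          ++ (PySem.List.pyRange nextId n' 1).map (fun j => (j, m + tOf cts j)) := by
      rw [List.map_append]
      congr 1
      · exact List.map_congr_left (fun i hi => by rw [hEkept i hi])
      · exact List.map_congr_left (fun j hj => by rw [hErange j hj])
    -- invariant for the next iteration
    have hInv' : InvAB cts N (kept ++ PySem.List.pyRange nextId n' 1)
        (insertRange enter nextId n' m) m n' := by
      refine ⟨?_, ?_, by omega, ha2, ?_, ?_, ?_⟩
      · refine List.pairwise_append.mpr ⟨hpw.filter _, PySem.List.pairwise_lt_pyRange_one _ _, ?_⟩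
        intro a haa b hbb
        have h1 := (hids a (hkeptsub a haa)).2
        have h2 := (hrangeids b hbb).1
        omega
      · intro i hi
        rcases List.mem_append.mp hi with h | h
        · have h1 := hids i (hkeptsub i h)
          omega
        · have h1 := hrangeids i h
          omega
      · intro i hi
        rcases List.mem_append.mp hi with h | h
        · rw [hEkept i h]
          have h1 := hmmin i (hkeptsub i h)
          have h2 := hkept_ne i h
          omega
        · rw [hErange i h]
          have h1 := hrangeids i h
          have h2 := tOf_ge_one cts ht i (by omega) (by omega)
          omega
      · rw [List.length_append]
        push_cast
        omega
      · rw [List.length_append]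
        push_cast
        rcases ha4 with h | h
        · exact Or.inl (by omega)
        · exact Or.inr h
    -- fuel for A
    have hb' : boundA cts (insertRange enter nextId n' m) m (kept ++ PySem.List.pyRange nextId n' 1) n'
        + (making.length : Int) * (m - second) = boundA cts enter second making nextId := by
      unfold boundA
      have e1 : ((making.filter (fun i => !(decide (finE cts enter i = m)))).map
            (fun i => finE cts enter i - m)).sum
          = (making.map (fun i => finE cts enter i - m)).sum :=
        sum_map_filter_not_of_zero _ _ making (fun i _ hp => by
          have : finE cts enter i = m := of_decide_eq_true hp
          omega)
      have e2 : (making.map (fun i => finE cts enter i - second)).sum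
          = (making.map (fun i => finE cts enter i - m)).sum
            + (making.length : Int) * (m - second) := by
        have : (making.map (fun i => finE cts enter i - second))
            = making.map (fun i => (finE cts enter i - m) + (m - second)) :=
          List.map_congr_left (fun i _ => by ring)
        rw [this, PySem.List.sum_map_add_int, PySem.List.sum_map_const_int]
      have e3 : tailSum cts nextId = ((PySem.List.pyRange nextId n' 1).map (tOf cts)).sum
          + tailSum cts n' := by
        unfold tailSum
        rw [PySem.List.pyRange_one_append nextId n' ((cts.length : Int) + 1) ha1 ha2,
          List.map_append, List.sum_append]
      have e4 : ((kept ++ PySem.List.pyRange nextId n' 1).map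
            (fun i => finE cts (insertRange enter nextId n' m) i - m)).sum
          = (kept.map (fun i => finE cts enter i - m)).sum
            + ((PySem.List.pyRange nextId n' 1).map (tOf cts)).sum := by
        rw [List.map_append, List.sum_append]
        congr 1
        · exact congrArg List.sum (List.map_congr_left (fun i hi => by rw [hEkept i hi]))
        · refine congrArg List.sum (List.map_congr_left (fun j hj => ?_))
          rw [hErange j hj]
          ring
      rw [e4, e3, e2, hkept, e1]
      ring
    have hlenpos : 1 ≤ (making.length : Int) := by
      have := List.length_pos_iff.mpr hmk
      omega
    have hmul : m - second ≤ (making.length : Int) * (m - second) :=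
      le_mul_of_one_le_left (by omega) hlenpos
    have hbA' : boundA cts (insertRange enter nextId n' m) m
        (kept ++ PySem.List.pyRange nextId n' 1) n' < ((f' : Int)) := by
      have hfa : (fA : Int) = (f' : Int) + 1 + (g : Int) := by
        rw [hf']
        push_cast
        ring
      linarith [hb', hmul, hbA, hgI, hfa]
    -- fuel for B
    have hkeptlt : kept.length < making.length := by
      rw [hkept]
      exact List.length_filter_lt_length_iff_exists.mpr ⟨i0, hi0mem, by simp [hi0]⟩
    have hbB' : (kept ++ PySem.List.pyRange nextId n' 1).length
        + (((cts.length : Int) + 1 - n').toNat) < fB' := by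
      rw [List.length_append, PySem.List.length_pyRange_one]
      omega
    have hrec := IH f' (by omega)
      (ans ++ making.filter (fun i => decide (finE cts enter i = m)))
      (kept ++ PySem.List.pyRange nextId n' 1) (insertRange enter nextId n' m) m n' fB'
      hInv' hbA' hbB'
    rw [hmapeq] at hrec
    exact hrec

-- ===== VERDICT (by name: the statement is the Claim_ definition above) =====
theorem solution_spec : Claim_equal_solution := by
  unfold Claim_equal_solution
  intro N cts hDom hPre
  unfold Spec_solution
  by_cases hN : N ≤ 0
  · have hA : solution N cts = [] := by
      simp only [solution]
      rw [PySem.List.pyRange_one_eq_nil (show N + 1 ≤ 1 by omega)]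
      simp [solutionLoop]
    have hB0 : solutionAltFill cts N 0 [] 1 = ([], 1) := by
      rw [solutionAltFill, dif_neg (by omega)]
    have hB : solution_alt N cts = [] := by
      simp only [solution_alt]
      rw [hB0]
      simp [solutionAltLoop]
    rw [hA, hB]
  · replace hN : 0 < N := by omega
    obtain ⟨hNM, ht⟩ : N ≤ (cts.length : Int) ∧ ∀ t ∈ cts, 1 ≤ t :=
      hPre.resolve_left (by omega)
    have hlen0 : (PySem.List.pyRange 1 (N+1) 1).length = N.toNat := by
      rw [PySem.List.length_pyRange_one]
      omega
    have hq0 : (PySem.List.pyRange 1 ((cts.length : Int) + 1) 1).drop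
          ((PySem.List.pyRange 1 (N+1) 1).length)
        = PySem.List.pyRange (N+1) ((cts.length : Int) + 1) 1 := by
      rw [PySem.List.pyRange_one_append 1 (N+1) ((cts.length : Int) + 1) (by omega) (by omega)]
      exact List.drop_left' rfl
    have hInit := init_fold (PySem.List.pyRange 1 (N+1) 1) PySem.Dict.empty
      (PySem.List.pyRange 1 ((cts.length : Int) + 1) 1)
    obtain ⟨n', hb1, hb2, hb3, hb4, _, hB⟩ := refill_corr cts N 0 N.toNat ([] : List Int)
      PySem.Dict.empty 1 (by simp only [List.length_nil, Nat.cast_zero, zero_add]; omega)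
      (by simp only [List.length_nil, Nat.cast_zero]; omega) (by omega)
    simp only [List.length_nil, Nat.cast_zero] at hb3 hb4
    have hn' : n' = N + 1 := by omega
    subst hn'
    have hfill := hB ([] : List (Int × Int)) rfl
    rw [List.nil_append] at hfill
    have hsum : ((cts.map Int.toNat).sum : Int) = cts.sum :=
      sum_toNat_of_nonneg cts (fun t ht' => by have := ht t ht'; omega)
    have hmain := loop_corr cts N ht ((cts.map Int.toNat).sum + 1) [] (PySem.List.pyRange 1 (N+1) 1)
      (insertRange PySem.Dict.empty 1 (N+1) 0) 0 (N+1) (cts.length + 1)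
      ?_ ?_ ?_
    · simp only [solution, solution_alt]
      rw [hInit]
      simp only []
      rw [hq0, hfill]
      have hEnter : (PySem.List.pyRange 1 (N+1) 1).foldl (fun d i => d.insert i 0) PySem.Dict.empty
          = insertRange PySem.Dict.empty 1 (N+1) 0 := rfl
      rw [hEnter]
      rw [hmain]
      congr 1
      apply List.map_congr_left
      intro i hi
      obtain ⟨h1, h2⟩ := PySem.List.mem_pyRange_one.mp hi
      unfold finE
      rw [getD_insertRange 0 ((N + 1 - 1).toNat) 1 (N+1) rfl, if_pos ⟨h1, h2⟩]
    · refine ⟨PySem.List.pairwise_lt_pyRange_one _ _, ?_, by omega, by omega, ?_, ?_, ?_⟩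
      · intro i hi
        exact PySem.List.mem_pyRange_one.mp hi
      · intro i hi
        obtain ⟨h1, h2⟩ := PySem.List.mem_pyRange_one.mp hi
        unfold finE
        rw [getD_insertRange 0 ((N + 1 - 1).toNat) 1 (N+1) rfl, if_pos ⟨h1, h2⟩]
        have := tOf_ge_one cts ht i (by omega) (by omega)
        omega
      · rw [hlen0]
        omega
      · rw [hlen0]
        exact Or.inl (by omega)
    · rw [boundA_init cts N (by omega) hNM]
      rw [show ((((cts.map Int.toNat).sum + 1 : Nat)) : Int) = cts.sum + 1 by
        rw [Nat.cast_add, Nat.cast_one, hsum]]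
      omega
    · rw [hlen0]
      omega
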